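-- pv_equiv track=rewrite | github.com/Parad0x13/ProjectEuler | Solutions/0932.py | allDigitalSplits
-- ===== SOURCE A (Python) =====
-- def allDigitalSplits(number):
-- 	a = list(str(number))
--
-- 	if number < 10:
-- 		return [number]
--
-- 	retVal = []
--
-- 	for n in range(1, len(a) ):
-- 		front = a[:n]
-- 		back = a[len(front):]
-- 		front = "".join(front)
-- 		back = "".join(back)
-- 		front = int(front)
-- 		back = int(back)
--
-- 		# We aren't interested in values that are multiplied by zero
-- 		if front == 0: continue    # [NOTE] This check is redundant as the leading digit cannot be zero
-- 		if back == 0: continue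
--
-- 		# Ensure we don't fall into a trap like "9801" as [98, 01] which properly concatenated would be 981 and therefor would not qualify
-- 		if str(number) != str(front) + str(back): continue
--
-- 		# This seems to be a pattern maybe? I have NO IDEA if this is actually true or not... This is JUST A TEST
-- 		#if len(str(front)) > len(str(back)): break
--
-- 		#if front + back > number: break    # I don't know if this is true... It might miss a case where back has a preceeding zero and qualifies. Or it just might be a dumb check to begin with
--
-- 		retVal.append([front, back])
--
-- 	return retVal
-- ===== SOURCE B (Python) =====
-- def allDigitalSplits(number):
-- 	if number < 10:
-- 		return [number]
--
-- 	# count decimal digits of number arithmetically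
-- 	d = 0
-- 	s = number
-- 	while s > 0:
-- 		d += 1
-- 		s //= 10
--
-- 	retVal = []
-- 	p = 10 ** (d - 1)
-- 	while p >= 10:
-- 		front = number // p
-- 		back = number % p
-- 		# back must have no leading zero, i.e. exactly as many digits as its slot
-- 		if back * 10 >= p:
-- 			retVal.append([front, back])
-- 		p //= 10
-- 	return retVal
-- ===== Notes on version B (the rewrite author's own statement) =====
-- stated objective: alternative
-- what changed: B computes each front/back split arithmetically with one floordiv/mod per split and tests 'no leading zero' as back*10 >= p, instead of A's building list(str(number)), slicing, joining, re-parsing with int() and re-comparing concatenated strings on every iteration; B never constructs a string.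
-- outside the precondition, e.g. on allDigitalSplits(7): A returns [7], B returns [7]; on allDigitalSplits(-5): A returns [-5], B returns [-5]
import Mathlib
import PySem

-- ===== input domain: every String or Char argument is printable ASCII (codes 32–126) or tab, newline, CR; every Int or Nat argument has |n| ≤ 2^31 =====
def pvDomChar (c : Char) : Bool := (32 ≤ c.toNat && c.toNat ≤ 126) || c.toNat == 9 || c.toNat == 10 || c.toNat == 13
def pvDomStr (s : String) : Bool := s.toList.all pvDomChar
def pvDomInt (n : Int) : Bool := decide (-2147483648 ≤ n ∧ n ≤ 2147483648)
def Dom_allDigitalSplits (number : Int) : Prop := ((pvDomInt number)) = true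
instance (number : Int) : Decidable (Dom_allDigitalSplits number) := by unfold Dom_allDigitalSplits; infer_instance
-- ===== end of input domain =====

-- B replaces A's per-split string slicing / joining / re-parsing / string comparison by one
-- arithmetic divmod per split with a no-leading-zero test (objective: alternative — purely
-- arithmetic, no string is ever built).

-- ===== PORT A =====
-- hand-ported int(s): exact on nonempty ASCII-digit strings, the only arguments this program
-- feeds it ("".join of slices of str(number) for number ≥ 10); none elsewhere = ValueError.
def pvIntOfDigits (cs : List Char) : Option Int :=
  if cs ≠ [] ∧ cs.all Char.isDigit then
    some (cs.foldl (fun acc c => acc * 10 + ((c.toNat : Int) - 48)) 0)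
  else none

def allDigitalSplits (number : Int) : List (List Int) :=
  let a := PySem.Int.toChars number          -- a = list(str(number)), as List Char
  if number < 10 then [[number]]             -- Python returns the bare [number] here: outside Pre_
  else
    (PySem.List.pyRange 1 (a.length : Int) 1).foldl (fun retVal n =>
      let front := PySem.List.slice a none (some n)
      let back := PySem.List.slice a (some (front.length : Int)) none
      let front := (pvIntOfDigits front).getD 0   -- int("".join(front)); always a digit string here
      let back := (pvIntOfDigits back).getD 0     -- int("".join(back))
      if front = 0 then retVal
      else if back = 0 then retVal
      else if PySem.Int.toChars number ≠ PySem.Int.toChars front ++ PySem.Int.toChars back then retVal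
      else retVal ++ [[front, back]]) []

-- ===== PORT B =====
-- d = 0; s = number; while s > 0: d += 1; s //= 10
def pvDigitCount (s : Int) : Nat :=
  if _h : s ≤ 0 then 0
  else pvDigitCount (PySem.Int.floordiv s 10) + 1
termination_by s.toNat
decreasing_by
  rw [PySem.Int.floordiv_eq_ediv_of_pos (by omega)]
  have h1 : s / 10 < s := Int.ediv_lt_of_lt_mul (by omega) (by omega)
  have h2 : 0 ≤ s / 10 := Int.ediv_nonneg (by omega) (by omega)
  omega

-- while p >= 10: front = number // p; back = number % p; if back * 10 >= p: append; p //= 10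
def pvSplitLoop (number : Int) (p : Int) (retVal : List (List Int)) : List (List Int) :=
  if _h : p < 10 then retVal
  else
    let front := PySem.Int.floordiv number p
    let back := PySem.Int.mod number p
    pvSplitLoop number (PySem.Int.floordiv p 10)
      (if p ≤ back * 10 then retVal ++ [[front, back]] else retVal)
termination_by p.toNat
decreasing_by
  rw [PySem.Int.floordiv_eq_ediv_of_pos (by omega)]
  have h1 : p / 10 < p := Int.ediv_lt_of_lt_mul (by omega) (by omega)
  have h2 : 0 ≤ p / 10 := Int.ediv_nonneg (by omega) (by omega)
  omega

def allDigitalSplits_alt (number : Int) : List (List Int) :=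
  if number < 10 then [[number]]              -- same early return as A; outside Pre_
  else pvSplitLoop number ((10 : Int) ^ (pvDigitCount number - 1)) []

-- ===== PRECONDITION & SPEC =====
-- Pre_ excludes number < 10: there Python A returns the bare one-element list [number] — an int
-- inside the list, not a [front, back] pair — which is not a value of the declared
-- list[list[int]] return type, so it cannot be represented (or matched) under the convention.
def Pre_allDigitalSplits (number : Int) : Prop := 10 ≤ number
instance (number : Int) : Decidable (Pre_allDigitalSplits number) := by
  unfold Pre_allDigitalSplits; infer_instance

def pvWitness_allDigitalSplits : Int := 9801

def Spec_allDigitalSplits (number : Int) (out : List (List Int)) : Prop := out = allDigitalSplits_alt number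
instance (number : Int) (out : List (List Int)) : Decidable (Spec_allDigitalSplits number out) := by unfold Spec_allDigitalSplits; infer_instance

-- ===== CLAIM (what is proved, stated in full; the proofs are below) =====
def Claim_equal_allDigitalSplits : Prop := ∀ (number : Int), Dom_allDigitalSplits number → Pre_allDigitalSplits number → Spec_allDigitalSplits number (allDigitalSplits number)

-- ===== LEMMAS AND PROOFS =====
def pvD (m : Nat) : List Char :=
  if m < 10 then [Nat.digitChar m]
  else pvD (m / 10) ++ [Nat.digitChar (m % 10)]
termination_by m
decreasing_by exact Nat.div_lt_self (by omega) (by omega)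

lemma pv_toDigitsCore_eq (f : Nat) : ∀ (m : Nat) (l : List Char), m < 10 ^ f →
    Nat.toDigitsCore 10 (f + 1) m l = pvD m ++ l := by
  induction f with
  | zero =>
    intro m l h
    have hm : m = 0 := by omega
    subst hm
    rw [pvD]
    rfl
  | succ f ih =>
    intro m l h
    rw [Nat.toDigitsCore]
    by_cases h10 : m < 10
    · have : m / 10 = 0 := Nat.div_eq_of_lt h10
      simp only [this]
      rw [pvD, if_pos h10, Nat.mod_eq_of_lt h10]
      rfl
    · have hne : m / 10 ≠ 0 := by
        intro hz; omega
      simp only [if_neg hne]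
      rw [ih (m / 10) _ (by
        have h2 : m < 10 * 10 ^ f := by rw [← pow_succ']; exact h
        exact Nat.div_lt_of_lt_mul h2)]
      conv_rhs => rw [pvD.eq_def, if_neg h10]
      simp

lemma pv_toDigits_eq (m : Nat) : Nat.toDigits 10 m = pvD m := by
  have hb : m < 10 ^ m := by
    calc m < 2 ^ m := Nat.lt_two_pow_self
    _ ≤ 10 ^ m := Nat.pow_le_pow_left (by omega) m
  rw [Nat.toDigits, pv_toDigitsCore_eq m m [] hb, List.append_nil]

lemma pv_toChars_eq (n : Int) (h : 0 ≤ n) : PySem.Int.toChars n = pvD n.toNat := by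
  rw [PySem.Int.toChars, if_neg (by omega), pv_toDigits_eq]

def pvPad (k m : Nat) : List Char :=
  match k with
  | 0 => []
  | k + 1 => pvPad k (m / 10) ++ [Nat.digitChar (m % 10)]

lemma pvD_split (k : Nat) : ∀ (a b : Nat), 1 ≤ a → b < 10 ^ k →
    pvD (a * 10 ^ k + b) = pvD a ++ pvPad k b := by
  induction k with
  | zero =>
    intro a b ha hb
    have hb0 : b = 0 := by omega
    subst hb0
    simp [pvPad]
  | succ k ih =>
    intro a b ha hb
    have hm10 : ¬ a * 10 ^ (k + 1) + b < 10 := by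
      have : 10 ≤ 10 ^ (k + 1) := by
        calc (10:Nat) = 10 ^ 1 := by norm_num
        _ ≤ 10 ^ (k + 1) := Nat.pow_le_pow_right (by omega) (by omega)
      nlinarith
    rw [pvD.eq_def, if_neg hm10]
    have hdiv : (a * 10 ^ (k + 1) + b) / 10 = a * 10 ^ k + b / 10 := by
      have : a * 10 ^ (k + 1) + b = (a * 10 ^ k) * 10 + b := by ring
      rw [this, add_comm, Nat.add_mul_div_right _ _ (show (0:Nat) < 10 by omega)]
      omega
    have hmod : (a * 10 ^ (k + 1) + b) % 10 = b % 10 := by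
      have : a * 10 ^ (k + 1) + b = (a * 10 ^ k) * 10 + b := by ring
      rw [this, add_comm, Nat.add_mul_mod_self_right]
    rw [hdiv, hmod, ih a (b / 10) ha (by
      have : b < 10 ^ k * 10 := by rw [← pow_succ]; exact hb
      exact Nat.div_lt_of_lt_mul (by omega))]
    simp [pvPad]

lemma pvD_pad_eq (k : Nat) : ∀ (b : Nat), 1 ≤ k → 10 ^ (k - 1) ≤ b → b < 10 ^ k →
    pvD b = pvPad k b := by
  induction k with
  | zero => omega
  | succ k ih =>
    intro b _ hlo hhi
    by_cases hk : k = 0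
    · subst hk
      norm_num at hlo hhi
      rw [pvD, if_pos hhi]
      simp [pvPad, Nat.div_eq_of_lt hhi, Nat.mod_eq_of_lt hhi]
    · have hk1 : 1 ≤ k := by omega
      have hb10 : ¬ b < 10 := by
        have : 10 ≤ 10 ^ k := by
          calc (10:Nat) = 10 ^ 1 := by norm_num
          _ ≤ 10 ^ k := Nat.pow_le_pow_right (by omega) hk1
        simp only [Nat.succ_sub_one] at hlo
        omega
      rw [pvD.eq_def, if_neg hb10]
      rw [ih (b / 10) hk1 (by
          simp only [Nat.succ_sub_one] at hlo
          rw [Nat.le_div_iff_mul_le (by omega)]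
          calc 10 ^ (k - 1) * 10 = 10 ^ k := by
                rw [← pow_succ]; congr 1; omega
          _ ≤ b := hlo)
        (by
          have : b < 10 ^ k * 10 := by rw [← pow_succ]; exact hhi
          exact Nat.div_lt_of_lt_mul (by omega))]
      rfl

lemma pvD_length_le (k : Nat) : ∀ (m : Nat), 1 ≤ k → m < 10 ^ k → (pvD m).length ≤ k := by
  induction k with
  | zero => omega
  | succ k ih =>
    intro m _ hm
    by_cases h10 : m < 10
    · rw [pvD, if_pos h10]; simp
    · have hk1 : 1 ≤ k := by
        by_contra hc
        have : k = 0 := by omega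
        subst this
        norm_num at hm
        omega
      rw [pvD.eq_def, if_neg h10]
      have := ih (m / 10) hk1 (by
        have : m < 10 ^ k * 10 := by rw [← pow_succ]; exact hm
        exact Nat.div_lt_of_lt_mul (by omega))
      simp only [List.length_append, List.length_cons, List.length_nil]
      omega

lemma pvD_bounds (m : Nat) (h : 1 ≤ m) :
    10 ^ ((pvD m).length - 1) ≤ m ∧ m < 10 ^ (pvD m).length := by
  induction m using pvD.induct with
  | case1 m hlt =>
    rw [pvD, if_pos hlt]
    simpa using ⟨h, hlt⟩
  | case2 m hlt ih =>
    rw [pvD.eq_def, if_neg hlt]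
    have h1 : 1 ≤ m / 10 := by omega
    obtain ⟨lo, hi⟩ := ih h1
    have hlp : 1 ≤ (pvD (m / 10)).length := by
      by_contra hc
      have h0 : (pvD (m / 10)).length = 0 := by omega
      rw [h0] at hi
      norm_num at hi
      omega
    simp only [List.length_append, List.length_cons, List.length_nil]
    constructor
    · have h2 : 10 ^ ((pvD (m / 10)).length - 1) * 10 = 10 ^ ((pvD (m / 10)).length) := by
        rw [← pow_succ]; congr 1; omega
      have h3 : (m / 10) * 10 ≤ m := Nat.div_mul_le_self m 10
      have h5 : 10 ^ ((pvD (m / 10)).length - 1) * 10 ≤ (m / 10) * 10 :=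
        Nat.mul_le_mul_right 10 lo
      have h4 : (pvD (m / 10)).length + 1 - 1 = (pvD (m / 10)).length := by omega
      rw [h4]
      omega
    · have h2 : m < (m / 10 + 1) * 10 := by omega
      have h3 : (m / 10 + 1) * 10 ≤ 10 ^ (pvD (m / 10)).length * 10 := by omega
      rw [pow_succ]
      omega

lemma pv_digitChar_isDigit (i : Nat) (h : i < 10) : (Nat.digitChar i).isDigit = true := by
  interval_cases i <;> decide

lemma pv_digitChar_val (i : Nat) (h : i < 10) : ((Nat.digitChar i).toNat : Int) - 48 = (i : Int) := by
  interval_cases i <;> decide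

lemma pv_fold_pvD (a : Nat) :
    (pvD a).foldl (fun acc c => acc * 10 + ((c.toNat : Int) - 48)) 0 = (a : Int) := by
  induction a using pvD.induct with
  | case1 a h =>
    rw [pvD, if_pos h]
    simp [pv_digitChar_val a h]
  | case2 a h ih =>
    rw [pvD.eq_def, if_neg h]
    rw [List.foldl_append, ih]
    simp only [List.foldl_cons, List.foldl_nil]
    rw [pv_digitChar_val _ (Nat.mod_lt _ (by omega))]
    have := Nat.div_add_mod a 10
    push_cast
    omega

lemma pv_fold_pvPad (k : Nat) : ∀ (b : Nat), b < 10 ^ k →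
    (pvPad k b).foldl (fun acc c => acc * 10 + ((c.toNat : Int) - 48)) 0 = (b : Int) := by
  induction k with
  | zero =>
    intro b hb
    have : b = 0 := by omega
    subst this
    rfl
  | succ k ih =>
    intro b hb
    show ((pvPad k (b / 10) ++ [Nat.digitChar (b % 10)]).foldl _ 0 = (b : Int))
    rw [List.foldl_append, ih (b / 10) (by
      have : b < 10 ^ k * 10 := by rw [← pow_succ]; exact hb
      exact Nat.div_lt_of_lt_mul (by omega))]
    simp only [List.foldl_cons, List.foldl_nil]
    rw [pv_digitChar_val _ (Nat.mod_lt _ (by omega))]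
    have := Nat.div_add_mod b 10
    push_cast
    omega

lemma pvDigitCount_natCast (m : Nat) : pvDigitCount (m : Int) = (if m = 0 then 0 else (pvD m).length) := by
  induction m using pvD.induct with
  | case1 m hlt =>
    by_cases h0 : m = 0
    · subst h0
      rw [pvDigitCount]
      simp
    · rw [pvDigitCount, dif_neg (by omega), show (10:Int) = ((10:Nat):Int) by norm_num, PySem.Int.floordiv_natCast]
      have : m / 10 = 0 := Nat.div_eq_of_lt hlt
      rw [this]
      rw [if_neg h0, pvD, if_pos hlt]
      simp [pvDigitCount]
  | case2 m hlt ih =>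
    rw [pvDigitCount, dif_neg (by omega), show (10:Int) = ((10:Nat):Int) by norm_num, PySem.Int.floordiv_natCast, ih]
    rw [if_neg (by omega), if_neg (by omega)]
    conv_rhs => rw [pvD.eq_def, if_neg hlt]
    simp

lemma pvD_ne_nil (m : Nat) : pvD m ≠ [] := by
  rw [pvD]; split <;> simp

lemma pvD_all_digit (m : Nat) : (pvD m).all Char.isDigit = true := by
  induction m using pvD.induct with
  | case1 m h => rw [pvD, if_pos h]; simp [pv_digitChar_isDigit m h]
  | case2 m h ih =>
    rw [pvD.eq_def, if_neg h]
    simp only [List.all_append, List.all_cons, List.all_nil, Bool.and_eq_true]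
    exact ⟨ih, pv_digitChar_isDigit _ (Nat.mod_lt _ (by omega)), trivial⟩

lemma pvPad_all_digit (k m : Nat) : (pvPad k m).all Char.isDigit = true := by
  induction k generalizing m with
  | zero => rfl
  | succ k ih =>
    simp only [pvPad, List.all_append, List.all_cons, List.all_nil, Bool.and_eq_true]
    exact ⟨ih _, pv_digitChar_isDigit _ (Nat.mod_lt _ (by omega)), trivial⟩

lemma pvPad_length (k m : Nat) : (pvPad k m).length = k := by
  induction k generalizing m with
  | zero => rfl
  | succ k ih => simp [pvPad, ih]

lemma pvIntOfDigits_pvD (a : Nat) : pvIntOfDigits (pvD a) = some (a : Int) := by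
  rw [pvIntOfDigits, if_pos ⟨pvD_ne_nil a, pvD_all_digit a⟩, pv_fold_pvD]

lemma pvIntOfDigits_pvPad (k b : Nat) (hk : 1 ≤ k) (hb : b < 10 ^ k) :
    pvIntOfDigits (pvPad k b) = some (b : Int) := by
  have hne : pvPad k b ≠ [] := by
    intro h
    have := pvPad_length k b
    rw [h] at this
    simp at this
    omega
  rw [pvIntOfDigits, if_pos ⟨hne, pvPad_all_digit k b⟩, pv_fold_pvPad k b hb]

def pvAstep (a : List Char) (number : Int) (retVal : List (List Int)) (n : Int) : List (List Int) :=
  let front := PySem.List.slice a none (some n)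
  let back := PySem.List.slice a (some (front.length : Int)) none
  let front := (pvIntOfDigits front).getD 0
  let back := (pvIntOfDigits back).getD 0
  if front = 0 then retVal
  else if back = 0 then retVal
  else if PySem.Int.toChars number ≠ PySem.Int.toChars front ++ PySem.Int.toChars back then retVal
  else retVal ++ [[front, back]]

lemma pv_pow_le (k l : Nat) (h : k ≤ l) : (10:Nat) ^ k ≤ 10 ^ l := Nat.pow_le_pow_right (by omega) h

lemma pv_iter (m : Nat) (hm : 10 ≤ m) (k : Nat) (hk1 : 1 ≤ k)
    (hk2 : k ≤ (pvD m).length - 1) (acc : List (List Int)) :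
    pvAstep (pvD m) (m : Int) acc (((pvD m).length - k : Nat) : Int)
      = if (10 : Nat) ^ k ≤ (m % 10 ^ k) * 10
          then acc ++ [[((m / 10 ^ k : Nat) : Int), ((m % 10 ^ k : Nat) : Int)]]
          else acc := by
  have hbounds := pvD_bounds m (by omega)
  have hd1 : 1 ≤ (pvD m).length := List.length_pos_of_ne_nil (pvD_ne_nil m)
  have hkm : (10:Nat) ^ k ≤ m := le_trans (pv_pow_le k ((pvD m).length - 1) (by omega)) hbounds.1
  have ha1 : 1 ≤ m / 10 ^ k := (Nat.one_le_div_iff (by positivity)).mpr hkm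
  have hb : m % 10 ^ k < 10 ^ k := Nat.mod_lt _ (by positivity)
  have hsp : pvD m = pvD (m / 10 ^ k) ++ pvPad k (m % 10 ^ k) := by
    conv_lhs => rw [show m = (m / 10 ^ k) * 10 ^ k + m % 10 ^ k by
      rw [mul_comm]; exact (Nat.div_add_mod m (10 ^ k)).symm ]
    exact pvD_split k _ _ ha1 hb
  have hlen : (pvD (m / 10 ^ k)).length = (pvD m).length - k := by
    have := congrArg List.length hsp
    simp only [List.length_append, pvPad_length] at this
    omega
  rw [pvAstep]
  rw [PySem.List.slice_to_natCast]
  rw [show List.take ((pvD m).length - k) (pvD m) = pvD (m / 10 ^ k) by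
    conv_lhs => rw [hsp]
    exact List.take_left' (by simp only [List.length_append, pvPad_length]; omega)]
  rw [PySem.List.slice_from_natCast]
  rw [show List.drop (pvD (m / 10 ^ k)).length (pvD m) = pvPad k (m % 10 ^ k) by
    conv_lhs => rw [hsp]
    exact List.drop_left' rfl]
  rw [pvIntOfDigits_pvD, pvIntOfDigits_pvPad k _ hk1 hb]
  simp only [Option.getD_some]
  rw [if_neg (by exact_mod_cast by omega)]
  by_cases hb0 : m % 10 ^ k = 0
  · rw [if_pos (by exact_mod_cast hb0), if_neg (by
      rw [hb0]
      simpa using pow_pos (by omega : (0:Nat) < 10) k)]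
  · rw [if_neg (by exact_mod_cast hb0)]
    have htc : PySem.Int.toChars ((m : Nat) : Int) = pvD m := by
      rw [pv_toChars_eq _ (by positivity), Int.toNat_natCast]
    have hiff : (pvD m = pvD (m / 10 ^ k) ++ pvD (m % 10 ^ k)) ↔ (10:Nat) ^ k ≤ (m % 10 ^ k) * 10 := by
      constructor
      · intro heq
        rw [hsp] at heq
        have hpd : pvD (m % 10 ^ k) = pvPad k (m % 10 ^ k) :=
          (List.append_cancel_left heq).symm
        by_contra hlt
        push_neg at hlt
        have h10 : (10:Nat) ^ (k - 1) * 10 = 10 ^ k := by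
          rw [← pow_succ]; congr 1; omega
        have hblt : m % 10 ^ k < 10 ^ (k - 1) := by omega
        have hlenb : (pvD (m % 10 ^ k)).length = k := by
          rw [hpd, pvPad_length]
        by_cases hk1' : k = 1
        · subst hk1'
          norm_num at hblt hb0
          omega
        · have := pvD_length_le (k - 1) (m % 10 ^ k) (by omega) hblt
          omega
      · intro hle
        have hge : (10:Nat) ^ (k - 1) ≤ m % 10 ^ k := by
          have h10 : (10:Nat) ^ (k - 1) * 10 = 10 ^ k := by
            rw [← pow_succ]; congr 1; omega
          omega
        rw [hsp, pvD_pad_eq k _ hk1 hge hb]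
    rw [htc]
    rw [show PySem.Int.toChars ((m / 10 ^ k : Nat) : Int) = pvD (m / 10 ^ k) by
      rw [pv_toChars_eq _ (by positivity), Int.toNat_natCast]]
    rw [show PySem.Int.toChars ((m % 10 ^ k : Nat) : Int) = pvD (m % 10 ^ k) by
      rw [pv_toChars_eq _ (by positivity), Int.toNat_natCast]]
    split_ifs with h1 h2 h2
    · exact absurd (hiff.mpr h2) h1
    · rfl
    · rfl
    · exact absurd (hiff.mp (by push_neg at h1; exact h1)) h2

lemma pvSplitLoop_low (number p : Int) (acc : List (List Int)) (h : p < 10) :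
    pvSplitLoop number p acc = acc := by
  rw [pvSplitLoop, dif_pos h]

lemma pvSplitLoop_step (number p : Int) (acc : List (List Int)) (h : ¬ p < 10) :
    pvSplitLoop number p acc =
      pvSplitLoop number (PySem.Int.floordiv p 10)
        (if p ≤ (PySem.Int.mod number p) * 10
          then acc ++ [[PySem.Int.floordiv number p, PySem.Int.mod number p]] else acc) := by
  rw [pvSplitLoop, dif_neg h]

lemma pv_cast10 : (10 : Int) = ((10 : Nat) : Int) := by norm_num

lemma pv_main (m : Nat) (hm : 10 ≤ m) : ∀ (t : Nat), t ≤ (pvD m).length - 1 →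
    ∀ (acc : List (List Int)),
    (PySem.List.pyRange (((pvD m).length - t : Nat) : Int) ((pvD m).length : Int) 1).foldl
        (pvAstep (pvD m) (m : Int)) acc
      = pvSplitLoop (m : Int) ((10 : Int) ^ t) acc := by
  intro t
  induction t with
  | zero =>
    intro _ acc
    rw [Nat.sub_zero, PySem.List.pyRange_one_eq_nil (le_refl _), List.foldl_nil,
        pvSplitLoop_low _ _ _ (by norm_num)]
  | succ t ih =>
    intro ht acc
    have hd1 : 1 ≤ (pvD m).length := List.length_pos_of_ne_nil (pvD_ne_nil m)
    have hcons : PySem.List.pyRange (((pvD m).length - (t+1) : Nat) : Int) ((pvD m).length : Int) 1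
        = (((pvD m).length - (t+1) : Nat) : Int)
            :: PySem.List.pyRange (((pvD m).length - t : Nat) : Int) ((pvD m).length : Int) 1 := by
      have e1 : (((pvD m).length - (t+1) : Nat) : Int) + 1 = (((pvD m).length - t : Nat) : Int) := by
        omega
      rw [PySem.List.pyRange_one_cons (by omega), e1]
    rw [hcons, List.foldl_cons]
    rw [pv_iter m hm (t+1) (by omega) ht acc]
    rw [ih (by omega) _]
    -- now the B side
    have hplt : ¬ ((10:Int) ^ (t+1) < 10) := by
      push_neg
      calc (10:Int) = 10 ^ 1 := by norm_num
      _ ≤ 10 ^ (t+1) := by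
        apply pow_le_pow_right₀ (by norm_num) (by omega)
    rw [pvSplitLoop_step _ _ _ hplt]
    have hp : (10 : Int) ^ (t+1) = (((10:Nat) ^ (t+1) : Nat) : Int) := by push_cast; ring
    rw [hp, PySem.Int.floordiv_natCast m _, PySem.Int.mod_natCast m _,
        pv_cast10, PySem.Int.floordiv_natCast]
    have hq : (((10:Nat) ^ (t+1) / 10 : Nat) : Int) = (10 : Int) ^ t := by
      rw [pow_succ, Nat.mul_div_cancel _ (by omega)]
      push_cast
      ring
    rw [hq]
    congr 1
    exact if_congr (by constructor <;> intro h' <;> exact_mod_cast h') rfl rfl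

lemma pv_A_eq (number : Int) (h : ¬ number < 10) :
    allDigitalSplits number =
      (PySem.List.pyRange 1 ((PySem.Int.toChars number).length : Int) 1).foldl
        (pvAstep (PySem.Int.toChars number) number) [] := by
  rw [allDigitalSplits]; simp only [if_neg h]; rfl


-- ===== VERDICT (by name: the statement is the Claim_ definition above) =====
theorem allDigitalSplits_spec : Claim_equal_allDigitalSplits := by
  intro number _ hpre
  unfold Spec_allDigitalSplits
  have hpre10 : (10 : Int) ≤ number := hpre
  obtain ⟨m, rfl⟩ : ∃ m : Nat, number = (m : Int) := ⟨number.toNat, by omega⟩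
  have hm : 10 ≤ m := by exact_mod_cast hpre10
  have h10 : ¬ ((m : Int) < 10) := by push_neg; exact_mod_cast hm
  rw [pv_A_eq _ h10]
  rw [allDigitalSplits_alt, if_neg h10]
  rw [pv_toChars_eq _ (by positivity), Int.toNat_natCast]
  rw [pvDigitCount_natCast, if_neg (by omega)]
  have hmain := pv_main m hm ((pvD m).length - 1) (le_refl _) []
  rw [show (((pvD m).length - ((pvD m).length - 1) : Nat) : Int) = 1 from by
    have hd1 : 1 ≤ (pvD m).length := List.length_pos_of_ne_nil (pvD_ne_nil m)
    omega] at hmain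
  exact hmain
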